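-- pv_equiv track=rewrite | github.com/Pr121204/form15cb-streamlit | modules/xml_shape_normalizer.py | _profile_distance
-- ===== SOURCE A (Python) =====
-- from typing import Dict, List, Literal, Optional, Tuple, TypedDict
--
-- PARENTS_FOR_PROFILE = (
--     "RemitteeAddrs",
--     "RemittanceDetails",
--     "ItActDetails",
--     "DTAADetails",
--     "TDSDetails",
-- )
--
-- def _profile_distance(a: Dict[str, Tuple[str, ...]], b: Dict[str, Tuple[str, ...]]) -> int:
--     distance = 0
--     for parent in PARENTS_FOR_PROFILE:
--         ax = a.get(parent, tuple())
--         bx = b.get(parent, tuple())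
--         m = min(len(ax), len(bx))
--         distance += abs(len(ax) - len(bx))
--         for i in range(m):
--             if ax[i] != bx[i]:
--                 distance += 1
--     return distance
-- ===== SOURCE B (Python) =====
-- PARENTS_FOR_PROFILE = (
--     "RemitteeAddrs",
--     "RemittanceDetails",
--     "ItActDetails",
--     "DTAADetails",
--     "TDSDetails",
-- )
--
-- def _profile_distance(a, b):
--     total = 0
--     for parent in PARENTS_FOR_PROFILE:
--         ax = a.get(parent, ())
--         bx = b.get(parent, ())
--         common = set(enumerate(ax)) & set(enumerate(bx))
--         total += max(len(ax), len(bx)) - len(common)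
--     return total
-- ===== Notes on version B (the rewrite author's own statement) =====
-- stated objective: alternative
-- what changed: Instead of summing abs length difference plus an index loop counting mismatches over the common prefix, B hashes each sequence into a set of (index, value) pairs and computes max(len) minus the size of the set intersection (positions agreeing), a set-based formulation with no element-wise comparison loop.
import Mathlib
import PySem

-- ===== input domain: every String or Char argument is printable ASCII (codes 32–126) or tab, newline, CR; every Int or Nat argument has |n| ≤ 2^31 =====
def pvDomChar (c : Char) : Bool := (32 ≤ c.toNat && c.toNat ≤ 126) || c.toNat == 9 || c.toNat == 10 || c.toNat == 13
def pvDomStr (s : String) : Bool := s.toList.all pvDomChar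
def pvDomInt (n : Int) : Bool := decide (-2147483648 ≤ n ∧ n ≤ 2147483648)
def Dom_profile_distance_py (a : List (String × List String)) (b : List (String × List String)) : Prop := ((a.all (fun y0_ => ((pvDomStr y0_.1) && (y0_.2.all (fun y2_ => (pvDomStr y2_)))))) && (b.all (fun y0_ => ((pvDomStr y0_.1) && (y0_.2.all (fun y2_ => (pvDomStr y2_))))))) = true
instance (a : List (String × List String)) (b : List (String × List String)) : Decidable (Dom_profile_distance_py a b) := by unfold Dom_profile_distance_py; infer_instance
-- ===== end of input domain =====

-- B replaces A's abs-length-difference + prefix mismatch loop by a set formulation: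
-- per parent, distance = max(len) − |set(enumerate(ax)) ∩ set(enumerate(bx))| (agreeing positions).

-- ===== PORT A =====
def pvParents : List String :=
  ["RemitteeAddrs", "RemittanceDetails", "ItActDetails", "DTAADetails", "TDSDetails"]

-- literal transliteration of A: per parent add abs length difference, then loop i in range(min)
def profile_distance_py (a : List (String × List String)) (b : List (String × List String)) : Int :=
  pvParents.foldl (fun distance parent =>
    let ax := PySem.Dict.getD (PySem.Dict.mk a) parent []
    let bx := PySem.Dict.getD (PySem.Dict.mk b) parent []
    let m : Int := min (ax.length : Int) (bx.length : Int)
    let distance := distance + |(ax.length : Int) - (bx.length : Int)|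
    (PySem.List.pyRange 0 m 1).foldl
      (fun d i => if PySem.List.pyGet? ax i ≠ PySem.List.pyGet? bx i then d + 1 else d)
      distance) 0

-- ===== PORT B =====
-- literal transliteration of Source B: common = set(enumerate(ax)) & set(enumerate(bx));
-- total += max(len(ax), len(bx)) - len(common)
def profile_distance_py_alt (a : List (String × List String)) (b : List (String × List String)) : Int :=
  pvParents.foldl (fun total parent =>
    let ax := PySem.Dict.getD (PySem.Dict.mk a) parent []
    let bx := PySem.Dict.getD (PySem.Dict.mk b) parent []
    let common := PySem.Set.inter (PySem.Set.ofList (PySem.List.enumerate ax))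
                                  (PySem.Set.ofList (PySem.List.enumerate bx))
    total + (max (ax.length : Int) (bx.length : Int) - PySem.Set.len common)) 0

-- ===== PRECONDITION & SPEC =====
def Spec_profile_distance_py (a : List (String × List String)) (b : List (String × List String)) (out : Int) : Prop := out = profile_distance_py_alt a b
instance (a : List (String × List String)) (b : List (String × List String)) (out : Int) : Decidable (Spec_profile_distance_py a b out) := by unfold Spec_profile_distance_py; infer_instance

-- ===== CLAIM (what is proved, stated in full; the proofs are below) =====
def Claim_equal_profile_distance_py : Prop := ∀ (a : List (String × List String)) (b : List (String × List String)), Dom_profile_distance_py a b → Spec_profile_distance_py a b (profile_distance_py a b)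

-- ===== LEMMAS AND PROOFS =====

-- mismatch / match counts over the common prefix (proof-side characterisations)
def pvMism : List String → List String → Int
  | x :: xs, y :: ys => (if x ≠ y then 1 else 0) + pvMism xs ys
  | _, _ => 0

def pvMatch : List String → List String → Nat
  | x :: xs, y :: ys => (if x = y then 1 else 0) + pvMatch xs ys
  | _, _ => 0

lemma pvMism_nil_right : ∀ xs : List String, pvMism xs [] = 0 := by
  intro xs; cases xs <;> simp [pvMism]

lemma pvMatch_nil_right : ∀ xs : List String, pvMatch xs [] = 0 := by
  intro xs; cases xs <;> simp [pvMatch]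

lemma pvMism_add_match : ∀ (xs ys : List String),
    pvMism xs ys + (pvMatch xs ys : Int) = min (xs.length : Int) (ys.length : Int) := by
  intro xs
  induction xs with
  | nil => intro ys; simp [pvMism, pvMatch]
  | cons x xs ih =>
    intro ys
    cases ys with
    | nil => simp [pvMism_nil_right, pvMatch_nil_right]; positivity
    | cons y ys =>
      have h := ih ys
      simp only [pvMism, pvMatch, List.length_cons]
      by_cases hxy : x = y <;> simp [hxy] <;> push_cast <;> omega

lemma pvLoop_eq : ∀ (xs ys : List String) (c : Int),
    (List.range (min xs.length ys.length)).foldl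
      (fun (d : Int) (k : Nat) => if PySem.List.pyGet? xs (k : Int) ≠ PySem.List.pyGet? ys (k : Int) then d + 1 else d) c
    = c + pvMism xs ys := by
  intro xs
  induction xs with
  | nil => intro ys c; simp [pvMism]
  | cons x xs ih =>
    intro ys c
    cases ys with
    | nil => simp [pvMism_nil_right]
    | cons y ys =>
      have hr : min (x :: xs).length (y :: ys).length = min xs.length ys.length + 1 := by
        simp [Nat.succ_min_succ]
      rw [hr, List.range_succ_eq_map, List.foldl_cons, List.foldl_map]
      have hb : ∀ (d : Int), ∀ k ∈ List.range (min xs.length ys.length),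
          (if PySem.List.pyGet? (x :: xs) ((Nat.succ k : Nat) : Int) ≠ PySem.List.pyGet? (y :: ys) ((Nat.succ k : Nat) : Int) then d + 1 else d)
          = (if PySem.List.pyGet? xs (k : Int) ≠ PySem.List.pyGet? ys (k : Int) then d + 1 else d) := by
        intro d k _
        have hc : ((Nat.succ k : Nat) : Int) = (k : Int) + 1 := by push_cast; ring
        rw [hc, PySem.List.pyGet?_cons_succ, PySem.List.pyGet?_cons_succ]
      rw [PySem.List.foldl_congr_mem _ _ _ _ hb]
      have h0 : (if PySem.List.pyGet? (x :: xs) (((0 : Nat) : Int)) ≠ PySem.List.pyGet? (y :: ys) (((0 : Nat) : Int)) then c + 1 else c)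
          = (if x ≠ y then c + 1 else c) := by
        have hc0 : (((0 : Nat)) : Int) = 0 := by norm_num
        rw [hc0, PySem.List.pyGet?_zero_cons, PySem.List.pyGet?_zero_cons]
        simp
      rw [h0, ih ys]
      simp only [pvMism]
      split_ifs <;> ring

lemma pvEnum_nodup (xs : List String) (s : Int) : (PySem.List.enumerate xs s).Nodup := by
  exact (PySem.List.pairwise_lt_enumerate xs s).imp (fun h => by
    intro he; rw [he] at h; exact lt_irrefl _ h)

-- the intersection of the two enumerated sets has exactly pvMatch elements
lemma pvFilter_enum_eq : ∀ (xs ys : List String) (s : Int),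
    ((PySem.List.enumerate xs s).filter
      (fun p => (PySem.List.enumerate ys s).contains p)).length = pvMatch xs ys := by
  intro xs
  induction xs with
  | nil => intro ys s; simp [PySem.List.enumerate, pvMatch]
  | cons x xs ih =>
    intro ys s
    cases ys with
    | nil => simp [PySem.List.enumerate_nil, pvMatch_nil_right]
    | cons y ys =>
      rw [PySem.List.enumerate_cons, PySem.List.enumerate_cons, List.filter_cons]
      have hmemtail : ∀ p ∈ PySem.List.enumerate xs (s + 1),
          ((s, y) :: PySem.List.enumerate ys (s + 1)).contains p
          = (PySem.List.enumerate ys (s + 1)).contains p := by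
        intro p hp
        obtain ⟨k, hk, hpk⟩ := (PySem.List.mem_enumerate_iff xs (s + 1) p).1 hp
        have hne : p ≠ (s, y) := by
          intro he
          rw [he] at hpk
          have : s = s + 1 + (k : Int) := congrArg Prod.fst hpk
          omega
        simp [hne]
      rw [List.filter_congr hmemtail]
      have hhead : ((s, y) :: PySem.List.enumerate ys (s + 1)).contains (s, x) = (x == y) := by
        by_cases hxy : x = y
        · simp [hxy]
        · have hnm : (s, x) ∉ PySem.List.enumerate ys (s + 1) := by
            intro hm
            obtain ⟨k, hk, hpk⟩ := (PySem.List.mem_enumerate_iff ys (s + 1) (s, x)).1 hm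
            have : s = s + 1 + (k : Int) := congrArg Prod.fst hpk
            omega
          simp [hxy, hnm, Prod.ext_iff]
      rw [hhead]
      by_cases hxy : x = y <;> simp [hxy, pvMatch, ih ys (s + 1)] <;> try omega

lemma pvInter_len (xs ys : List String) :
    PySem.Set.len (PySem.Set.inter (PySem.Set.ofList (PySem.List.enumerate xs))
                                   (PySem.Set.ofList (PySem.List.enumerate ys)))
    = (pvMatch xs ys : Int) := by
  rw [PySem.Set.ofList_eq_self_of_nodup _ (pvEnum_nodup xs 0),
      PySem.Set.ofList_eq_self_of_nodup _ (pvEnum_nodup ys 0)]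
  show (((PySem.List.enumerate xs 0).filter
      (fun p => (PySem.List.enumerate ys 0).contains p)).length : Int) = _
  rw [pvFilter_enum_eq xs ys 0]

-- A's per-parent contribution equals B's per-parent contribution
lemma pvStep_eq (a b : List (String × List String)) (distance : Int) (parent : String) :
    (let ax := PySem.Dict.getD (PySem.Dict.mk a) parent []
     let bx := PySem.Dict.getD (PySem.Dict.mk b) parent []
     let m : Int := min (ax.length : Int) (bx.length : Int)
     let distance := distance + |(ax.length : Int) - (bx.length : Int)|
     (PySem.List.pyRange 0 m 1).foldl
       (fun d i => if PySem.List.pyGet? ax i ≠ PySem.List.pyGet? bx i then d + 1 else d)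
       distance)
    = (let ax := PySem.Dict.getD (PySem.Dict.mk a) parent []
       let bx := PySem.Dict.getD (PySem.Dict.mk b) parent []
       let common := PySem.Set.inter (PySem.Set.ofList (PySem.List.enumerate ax))
                                     (PySem.Set.ofList (PySem.List.enumerate bx))
       distance + (max (ax.length : Int) (bx.length : Int) - PySem.Set.len common)) := by
  set ax := PySem.Dict.getD (PySem.Dict.mk a) parent [] with hax
  set bx := PySem.Dict.getD (PySem.Dict.mk b) parent [] with hbx
  show (PySem.List.pyRange 0 (min (ax.length : Int) (bx.length : Int)) 1).foldl
       (fun d i => if PySem.List.pyGet? ax i ≠ PySem.List.pyGet? bx i then d + 1 else d)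
       (distance + |(ax.length : Int) - (bx.length : Int)|)
    = distance + (max (ax.length : Int) (bx.length : Int) - PySem.Set.len (PySem.Set.inter (PySem.Set.ofList (PySem.List.enumerate ax)) (PySem.Set.ofList (PySem.List.enumerate bx))))
  have hm : (min ((ax.length : Int)) ((bx.length : Int)) - 0).toNat = min ax.length bx.length := by
    omega
  rw [PySem.List.pyRange_one, hm, List.foldl_map]
  have hz : ∀ (d : Int), ∀ k ∈ List.range (min ax.length bx.length),
      (if PySem.List.pyGet? ax ((0 : Int) + (k : Int)) ≠ PySem.List.pyGet? bx ((0 : Int) + (k : Int)) then d + 1 else d)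
      = (if PySem.List.pyGet? ax (k : Int) ≠ PySem.List.pyGet? bx (k : Int) then d + 1 else d) := by
    intro d k _; rw [zero_add]
  rw [PySem.List.foldl_congr_mem _ _ _ _ hz, pvLoop_eq ax bx, pvInter_len ax bx]
  have h1 := pvMism_add_match ax bx
  have h2 : max ((ax.length : Int)) ((bx.length : Int)) - min ((ax.length : Int)) ((bx.length : Int)) = |(ax.length : Int) - (bx.length : Int)| := by
    rw [abs_sub_comm]; exact max_sub_min_eq_abs _ _
  omega

-- ===== VERDICT (by name: the statement is the Claim_ definition above) =====
theorem profile_distance_py_spec : Claim_equal_profile_distance_py := by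
  intro a b _
  unfold Spec_profile_distance_py profile_distance_py profile_distance_py_alt
  refine (PySem.List.foldl_congr_mem _ _ _ _ ?_).symm
  intro d p _
  exact (pvStep_eq a b d p).symm
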